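-- pv_equiv track=rewrite | github.com/wukm/pycake | scoring.py | chain_lengths
-- ===== SOURCE A (Python) =====
-- import itertools
--
-- def chain_lengths(iterable):
--
--     pos, s = 0, 0
--
--     for b, g in itertools.groupby(iterable):
--
--         if not b:
--             # alternative if the bottom doesn't work or something
--             #d = deque(enumerate(g,1), maxlen=1)
--             #pos += d[0][0] if d else 0
--
--             pos += sum((1 for i in g if not i))
--
--         else:
--
--             s = sum(g)
--
--             yield pos, s
--
--             pos += s
--
--     if not s:
--         # so it will return something even if iterable is empty
--         yield 0, 0
-- ===== SOURCE B (Python) =====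
-- def chain_lengths(iterable):
--     xs = list(iterable)
--     n = len(xs)
--     runs = []
--     i = 0
--     while i < n:
--         if not xs[i]:
--             i += 1
--         else:
--             j = i
--             while j < n and xs[j]:
--                 j += 1
--             runs.append((i, j - i))
--             i = j
--     if runs:
--         yield from runs
--     else:
--         yield (0, 0)
-- ===== Notes on version B (the rewrite author's own statement) =====
-- stated objective: simpler
-- what changed: Replaces itertools.groupby plus per-group generator sums and the leftover-s fallback test with a direct index scan that collects (start, length) of each True run and yields (0,0) exactly when no run was found.
import Mathlib
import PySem

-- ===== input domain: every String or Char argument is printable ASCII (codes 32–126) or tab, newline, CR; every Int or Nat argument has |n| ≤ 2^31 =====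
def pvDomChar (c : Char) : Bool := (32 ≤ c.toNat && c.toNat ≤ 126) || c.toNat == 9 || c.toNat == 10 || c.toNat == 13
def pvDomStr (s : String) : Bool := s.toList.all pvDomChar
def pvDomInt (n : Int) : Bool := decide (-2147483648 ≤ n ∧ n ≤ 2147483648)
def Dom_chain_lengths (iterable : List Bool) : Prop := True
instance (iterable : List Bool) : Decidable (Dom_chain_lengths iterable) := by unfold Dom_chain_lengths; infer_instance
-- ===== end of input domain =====

-- B replaces itertools.groupby + per-group generator sums with a direct index scan over True runs (simpler, same cost).

-- ===== PORT A =====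
-- itertools.groupby on a list of Bools: maximal runs of equal elements, as (key, group)
def pyGroupBy : List Bool → List (Bool × List Bool)
  | [] => []
  | x :: t =>
    match pyGroupBy t with
    | (b, g) :: rest => if x == b then (b, x :: g) :: rest else (x, [x]) :: (b, g) :: rest
    | [] => [(x, [x])]

-- the loop body of A: state (pos, s, yielded-so-far)
def aStep (st : Int × Int × List (Int × Int)) (bg : Bool × List Bool) : Int × Int × List (Int × Int) :=
  let (pos, s, out) := st
  if !bg.1 then
    (pos + ((bg.2.filter (fun i => !i)).length : Int), s, out)
  else
    let s' : Int := (bg.2.map (fun x => if x then (1:Int) else 0)).sum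
    (pos + s', s', out ++ [(pos, s')])

def chain_lengths (iterable : List Bool) : List (Int × Int) :=
  let (_, s, out) := (pyGroupBy iterable).foldl aStep ((0:Int), (0:Int), ([] : List (Int × Int)))
  if s == 0 then out ++ [(0, 0)] else out

-- ===== PORT B =====
-- length of the inner while loop's run of leading Trues
def altTakeTrue : List Bool → Nat
  | true :: t => altTakeTrue t + 1
  | _ => 0

-- the outer while loop: i is the current index (as Int, for the output)
def altGo : List Bool → Int → List (Int × Int)
  | [], _ => []
  | false :: t, i => altGo t (i + 1)
  | true :: t, i =>
      let k := altTakeTrue t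
      (i, (k : Int) + 1) :: altGo (t.drop k) (i + (k : Int) + 1)
termination_by xs => xs.length
decreasing_by
  all_goals (simp [List.length_drop]; try omega)

def chain_lengths_alt (iterable : List Bool) : List (Int × Int) :=
  let runs := altGo iterable 0
  if runs.isEmpty then [(0, 0)] else runs

-- ===== PRECONDITION & SPEC =====
def Spec_chain_lengths (iterable : List Bool) (out : List (Int × Int)) : Prop := out = chain_lengths_alt iterable
instance (iterable : List Bool) (out : List (Int × Int)) : Decidable (Spec_chain_lengths iterable out) := by unfold Spec_chain_lengths; infer_instance

-- ===== CLAIM (what is proved, stated in full; the proofs are below) =====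
def Claim_equal_chain_lengths : Prop := ∀ (iterable : List Bool), Dom_chain_lengths iterable → Spec_chain_lengths iterable (chain_lengths iterable)

-- ===== LEMMAS AND PROOFS =====

-- groupby peels off the maximal leading run
theorem pyGroupBy_cons (x : Bool) (t : List Bool) :
    pyGroupBy (x :: t) =
      (x, x :: t.takeWhile (· == x)) :: pyGroupBy (t.drop (t.takeWhile (· == x)).length) := by
  induction t generalizing x with
  | nil => simp [pyGroupBy]
  | cons y t' ih =>
    by_cases h : y = x
    · subst h
      rw [pyGroupBy, ih y]
      simp [List.takeWhile]
    · have hx : (y == x) = false := by simp [h]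
      rw [pyGroupBy, ih y]
      simp [List.takeWhile, hx, Ne.symm h, ← ih y]

-- altGo skips a leading False
theorem altGo_false (t : List Bool) (i : Int) : altGo (false :: t) i = altGo t (i + 1) := by
  rw [altGo]

theorem altTakeTrue_eq_takeWhile (t : List Bool) :
    altTakeTrue t = (t.takeWhile (· == true)).length := by
  induction t with
  | nil => simp [altTakeTrue]
  | cons y t' ih => cases y <;> simp [altTakeTrue, List.takeWhile, ih]

-- altGo is [] iff the list has no True
theorem altGo_nil_iff (t : List Bool) (i : Int) : altGo t i = [] ↔ ∀ b ∈ t, b = false := by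
  induction t generalizing i with
  | nil => simp [altGo]
  | cons y t' ih =>
    cases y
    · rw [altGo_false]; simp [ih]
    · rw [altGo]; simp

theorem filter_not_all_false (l : List Bool) (h : ∀ b ∈ l, b = false) :
    l.filter (fun i => !i) = l := by
  apply List.filter_eq_self.mpr
  intro b hb; simp [h b hb]

theorem sum_map_all_true (l : List Bool) (h : ∀ b ∈ l, b = true) :
    (l.map (fun x => if x then (1:Int) else 0)).sum = l.length := by
  induction l with
  | nil => simp
  | cons y t ih =>
    have := h y (by simp)
    simp [this, ih (fun b hb => h b (by simp [hb]))]
    omega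

-- altGo skips a maximal run of leading Falses
theorem altGo_skip_false (t : List Bool) (pos : Int) :
    altGo t pos = altGo (t.drop (t.takeWhile (· == false)).length)
                        (pos + (t.takeWhile (· == false)).length) := by
  induction t generalizing pos with
  | nil => simp
  | cons y t' ih =>
    cases y
    · rw [altGo_false, ih]
      simp [List.takeWhile]
      ring_nf
    · simp [List.takeWhile]

-- falsity of the tail after the maximal false prefix propagates to the whole list
theorem all_false_of_drop (t : List Bool)
    (h : ∀ b ∈ t.drop (t.takeWhile (· == false)).length, b = false) : ∀ b ∈ t, b = false := by
  induction t with
  | nil => simp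
  | cons y t' ih =>
    cases y
    · simp only [List.takeWhile] at h
      simp only [show ((false == false) = true) from rfl] at h
      intro b hb
      rcases List.mem_cons.mp hb with hb | hb
      · exact hb
      · exact ih (by simpa using h) b hb
    · simp only [List.takeWhile] at h
      simp only [show ((true == false) = false) from rfl] at h
      intro b hb
      exact h b (by simpa using hb)

-- the main loop invariant
theorem foldl_aStep (n : Nat) : ∀ (xs : List Bool), xs.length ≤ n → ∀ (pos s : Int) (out : List (Int × Int)),
    ∃ s', (pyGroupBy xs).foldl aStep (pos, s, out) = (pos + xs.length, s', out ++ altGo xs pos)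
      ∧ (s' = 0 ↔ (s = 0 ∧ ∀ b ∈ xs, b = false)) := by
  induction n with
  | zero =>
    intro xs hn pos s out
    have : xs = [] := List.length_eq_zero_iff.mp (Nat.le_zero.mp hn)
    subst this
    exact ⟨s, by simp [pyGroupBy, altGo], by simp⟩
  | succ n ih =>
    intro xs hn pos s out
    match xs with
    | [] => exact ⟨s, by simp [pyGroupBy, altGo], by simp⟩
    | x :: t =>
      rw [pyGroupBy_cons, List.foldl_cons]
      cases x with
      | false =>
        set tw := t.takeWhile (· == false) with htwdef
        have htw : ∀ b ∈ tw, b = false := by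
          intro b hb
          have hb' : b ∈ t.takeWhile (· == false) := htwdef ▸ hb
          exact eq_of_beq (List.mem_takeWhile_imp (p := (· == false)) hb')
        have hlen : tw.length ≤ t.length := htwdef ▸ (List.takeWhile_sublist _).length_le
        have hdroplen : (t.drop tw.length).length ≤ n := by
          rw [List.length_drop]
          simp at hn; omega
        have hfilt : ((false :: tw).filter (fun i => !i)) = false :: tw := by
          apply filter_not_all_false
          intro b hb
          rcases List.mem_cons.mp hb with h | h
          · exact h
          · exact htw b h
        have hstep : aStep (pos, s, out) (false, false :: tw)
            = (pos + ((tw.length : Int) + 1), s, out) := by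
          simp only [aStep, hfilt]
          simp
          try ring
        rw [hstep]
        obtain ⟨s', hfold, hiff⟩ := ih (t.drop tw.length) hdroplen
          (pos + ((tw.length : Int) + 1)) s out
        refine ⟨s', ?_, ?_⟩
        · rw [hfold]
          simp only [Prod.mk.injEq]
          refine ⟨?_, trivial, ?_⟩
          · rw [List.length_drop]
            simp
            omega
          · have harg : (pos + 1) + (tw.length : Int) = pos + ((tw.length : Int) + 1) := by ring
            rw [altGo_false, altGo_skip_false t (pos + 1), ← htwdef, harg]
        · rw [hiff]
          constructor <;> intro ⟨h1, h2⟩ <;> refine ⟨h1, ?_⟩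
          · intro b hb
            rcases List.mem_cons.mp hb with h | h
            · exact h
            · exact all_false_of_drop t (htwdef ▸ h2) b h
          · intro b hb
            exact h2 b (by simp [List.mem_of_mem_drop hb])
      | true =>
        set tw := t.takeWhile (· == true) with htwdef
        have htw : ∀ b ∈ tw, b = true := by
          intro b hb
          have hb' : b ∈ t.takeWhile (· == true) := htwdef ▸ hb
          exact eq_of_beq (List.mem_takeWhile_imp (p := (· == true)) hb')
        have hlen : tw.length ≤ t.length := htwdef ▸ (List.takeWhile_sublist _).length_le
        have hdroplen : (t.drop tw.length).length ≤ n := by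
          rw [List.length_drop]
          simp at hn; omega
        have hsum : (((true :: tw).map (fun x => if x then (1:Int) else 0)).sum)
            = ((tw.length : Int) + 1) := by
          rw [sum_map_all_true]
          · simp; try ring
          · intro b hb
            rcases List.mem_cons.mp hb with h | h
            · exact h
            · exact htw b h
        have hstep : aStep (pos, s, out) (true, true :: tw)
            = (pos + ((tw.length : Int) + 1), ((tw.length : Int) + 1),
               out ++ [(pos, ((tw.length : Int) + 1))]) := by
          simp only [aStep, hsum]
          simp
        rw [hstep]
        obtain ⟨s', hfold, hiff⟩ := ih (t.drop tw.length) hdroplen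
          (pos + ((tw.length : Int) + 1)) ((tw.length : Int) + 1)
          (out ++ [(pos, ((tw.length : Int) + 1))])
        refine ⟨s', ?_, ?_⟩
        · rw [hfold]
          simp only [Prod.mk.injEq]
          refine ⟨?_, trivial, ?_⟩
          · rw [List.length_drop]
            simp
            omega
          · rw [altGo, altTakeTrue_eq_takeWhile, ← htwdef]
            simp only [List.append_assoc, List.singleton_append]
            have harg : pos + (tw.length : Int) + 1 = pos + ((tw.length : Int) + 1) := by ring
            rw [harg]
        · rw [hiff]
          constructor
          · intro ⟨h1, _⟩
            exfalso; omega
          · intro ⟨_, h2⟩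
            exact absurd (h2 true (by simp)) (by simp)

-- ===== VERDICT (by name: the statement is the Claim_ definition above) =====
theorem chain_lengths_spec : Claim_equal_chain_lengths := by
  intro iterable _
  unfold Spec_chain_lengths chain_lengths chain_lengths_alt
  obtain ⟨s', h, hiff⟩ := foldl_aStep iterable.length iterable le_rfl 0 0 []
  rw [h]
  simp only [List.nil_append]
  by_cases hall : ∀ b ∈ iterable, b = false
  · have h0 : s' = 0 := hiff.mpr ⟨rfl, hall⟩
    have hnil : altGo iterable 0 = [] := (altGo_nil_iff iterable 0).mpr hall
    simp [h0, hnil]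
  · have h0 : s' ≠ 0 := fun h' => hall (hiff.mp h').2
    have hnil : altGo iterable 0 ≠ [] := fun h' => hall ((altGo_nil_iff iterable 0).mp h')
    simp [h0, List.isEmpty_iff, hnil]
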